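-- pv_equiv track=rewrite | github.com/KIMJINOH97/Algorithm | Programmers/kakao/jwely_shopping.py | solution
-- ===== SOURCE A (Python) =====
-- def solution(gems):
--     answer = []
--     dia = set(gems)
--     check = {j: 0 for j in dia}
--
--     l, r = 0, 0
--     check[gems[l]] += 1
--     cnt = 1
--
--     while l <= r:
--         if r == len(gems)-1 and r-l+1 < len(dia):
--             break
--         if cnt == len(dia):
--             answer.append([l+1, r+1])
--             check[gems[l]] -= 1
--             if check[gems[l]] == 0:
--                 cnt -= 1
--             l += 1
--         else:
--             if r != len(gems) - 1:
--                 r += 1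
--                 if check[gems[r]] == 0:
--                     cnt += 1
--                 check[gems[r]] += 1
--             else:
--                 check[gems[l]] -= 1
--                 if check[gems[l]] == 0:
--                     cnt -= 1
--                 l += 1
--
--     answer = sorted(answer, key=lambda x: (x[1]-x[0], x[0], x[1]))
--     return answer[0]
-- ===== SOURCE B (Python) =====
-- def solution(gems):
--     kinds = len(set(gems))
--     last = {}
--     best = None
--     for r, g in enumerate(gems):
--         last[g] = r
--         if len(last) == kinds:
--             l = min(last.values())
--             if best is None or r - l < best[1] - best[0]:
--                 best = (l, r)
--     return [best[0] + 1, best[1] + 1]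
-- ===== Notes on version B (the rewrite author's own statement) =====
-- stated objective: faster
-- what changed: B replaces A's two-pointer sliding window that collects every qualifying window into a list and sorts it by (length, start, end) with a single forward scan keeping a dict of each type's last occurrence: when the dict holds all types, the window ending at r starts at min(last.values()), and the running best is updated inline - no shrink loop, no candidate list, no sort.
-- outside the precondition, e.g. on solution([]): A raises IndexError, B raises TypeError
import Mathlib
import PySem

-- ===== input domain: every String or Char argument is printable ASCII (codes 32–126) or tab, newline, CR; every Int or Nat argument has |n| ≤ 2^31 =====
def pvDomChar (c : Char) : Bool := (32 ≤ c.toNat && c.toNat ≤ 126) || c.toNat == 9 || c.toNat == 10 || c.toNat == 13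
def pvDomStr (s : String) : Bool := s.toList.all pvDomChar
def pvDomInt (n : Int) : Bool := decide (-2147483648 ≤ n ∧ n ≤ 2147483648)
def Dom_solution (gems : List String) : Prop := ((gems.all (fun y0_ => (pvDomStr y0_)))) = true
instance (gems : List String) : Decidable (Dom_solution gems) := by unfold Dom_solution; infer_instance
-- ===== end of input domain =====

-- B replaces A's two-pointer sliding window (collect all windows, sort, take first) by a
-- last-occurrence scan: for each r the best window ending at r starts at min(last occurrence
-- of each type); the running best is kept inline (objective: faster — no shrink loop, no sort).


-- ===== PORT A =====
-- the while loop of A; fuel (2*len(gems)+2) only makes the recursion total: each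
-- iteration increments l or r, so the loop runs at most 2*len(gems) times
def solA_loop (gems : List String) (n dia : Nat) :
    Nat → Nat → PySem.Dict String Int → Int → List (List Int) → Nat → List (List Int)
  | _, _, _, _, ans, 0 => ans
  | l, r, check, cnt, ans, fuel+1 =>
    if l ≤ r then
      if r = n - 1 ∧ r - l + 1 < dia then ans
      else if cnt = (dia : Int) then
        let ans' := ans ++ [[(l : Int) + 1, (r : Int) + 1]]
        let x := gems.getD l ""          -- gems[l]; l ≤ r < n here
        let v := check.getD x 0 - 1      -- check[gems[l]] -= 1 (key always present)
        let cnt' := if v = 0 then cnt - 1 else cnt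
        solA_loop gems n dia (l+1) r (check.insert x v) cnt' ans' fuel
      else if r ≠ n - 1 then
        let g := gems.getD (r+1) ""      -- gems[r] after r += 1
        let cnt' := if check.getD g 0 = 0 then cnt + 1 else cnt
        solA_loop gems n dia l (r+1) (check.insert g (check.getD g 0 + 1)) cnt' ans fuel
      else
        let x := gems.getD l ""
        let v := check.getD x 0 - 1
        let cnt' := if v = 0 then cnt - 1 else cnt
        solA_loop gems n dia (l+1) r (check.insert x v) cnt' ans fuel
    else ans

def solution (gems : List String) : List Int :=
  let diaSet := PySem.Set.ofList gems                                   -- dia = set(gems)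
  let check0 := diaSet.foldl (fun d j => d.insert j 0) PySem.Dict.empty -- {j: 0 for j in dia}
  let g0 := gems.getD 0 ""                                              -- gems[0] (gems ≠ [] by Pre_)
  let check := check0.insert g0 (check0.getD g0 0 + 1)                  -- check[gems[l]] += 1
  let ans := solA_loop gems gems.length diaSet.length 0 0 check 1 [] (2*gems.length+2)
  -- sorted(answer, key=lambda x: (x[1]-x[0], x[0], x[1])): every element is a 2-list,
  -- so x[1] = (x[1]-x[0]) + x[0] is determined by the first two key components and the
  -- 3-tuple key orders exactly like this 2-tuple key (same comparisons, same stability)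
  let sortedAns := PySem.List.sorted2 ans
      (fun x => PySem.List.pyGetD x 1 0 - PySem.List.pyGetD x 0 0)
      (fun x => PySem.List.pyGetD x 0 0)
  PySem.List.pyGetD sortedAns 0 []     -- answer[0]; nonempty whenever gems ≠ []

-- ===== PORT B =====
-- the 'for r, g in enumerate(gems)' of Source B: record last occurrences; whenever the dict
-- holds every kind, the candidate window ending at r starts at min(last.values())
def solB_loop (kinds : Nat) :
    List (Int × String) → PySem.Dict String Int → Option (Int × Int) → Option (Int × Int)
  | [], _, best => best
  | (r, g) :: rest, last, best =>
    let last' := last.insert g r                            -- last[g] = r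
    let best' :=
      if last'.size = kinds then                            -- len(last) == kinds
        -- min(last.values()); the dict is nonempty here, so min? is some and getD 0 is exact
        let l := (PySem.List.min? last'.values (fun x => x)).getD 0
        match best with
        | none => some (l, r)
        | some b => if r - l < b.2 - b.1 then some (l, r) else best
      else best
    solB_loop kinds rest last' best'

def solution_alt (gems : List String) : List Int :=
  let kinds := (PySem.Set.ofList gems).length               -- len(set(gems))
  match solB_loop kinds (PySem.List.enumerate gems 0) PySem.Dict.empty none with
  | some b => [b.1 + 1, b.2 + 1]                            -- [best[0]+1, best[1]+1]
  | none => []      -- best is None: Python B raises TypeError there; excluded by Pre_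

-- ===== PRECONDITION & SPEC =====
-- Pre_ excludes only gems = [], where A raises IndexError on gems[0] (and B raises too)
def Pre_solution (gems : List String) : Prop := gems ≠ []
instance (gems : List String) : Decidable (Pre_solution gems) := by unfold Pre_solution; infer_instance
def pvWitness_solution : List String := ["a", "b", "a"]

def Spec_solution (gems : List String) (out : List Int) : Prop := out = solution_alt gems
instance (gems : List String) (out : List Int) : Decidable (Spec_solution gems out) := by unfold Spec_solution; infer_instance

-- ===== CLAIM (what is proved, stated in full; the proofs are below) =====
def Claim_equal_solution : Prop := ∀ (gems : List String), Dom_solution gems → Pre_solution gems → Spec_solution gems (solution gems)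

-- ===== LEMMAS AND PROOFS =====

-- the window gems[l..r]
def winW (gems : List String) (l r : Nat) : List String := (gems.drop l).take (r+1-l)
-- number of distinct gem types in the window
def cardW (gems : List String) (l r : Nat) : Nat := (winW gems l r).toFinset.card
-- number of distinct gems overall ( = len(set(gems)) )
def ddP (gems : List String) : Nat := (PySem.Set.ofList gems).length
-- [l+1, r+1] as both programs return it
def pairF (p : Nat × Nat) : List Int := [(p.1 : Int) + 1, (p.2 : Int) + 1]
-- "window [l..r] contains every gem type" plus well-formedness
def Cov (gems : List String) (l r : Nat) : Prop :=
  l ≤ r ∧ r < gems.length ∧ ∀ g ∈ gems, g ∈ winW gems l r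
-- strict order "shorter, or same length and further left"
def lexLt (p q : Nat × Nat) : Prop :=
  p.2 - p.1 < q.2 - q.1 ∨ (p.2 - p.1 = q.2 - q.1 ∧ p.1 < q.1)
-- the globally optimal covering window under A's sort key
def GOpt (gems : List String) (m : Nat × Nat) : Prop :=
  Cov gems m.1 m.2 ∧ ∀ p : Nat × Nat, Cov gems p.1 p.2 → p ≠ m → lexLt m p
-- index of the last occurrence of g among gems[0..k-1]
def lastIdx (gems : List String) : Nat → String → Option Nat
  | 0, _ => none
  | k+1, g => if gems[k]? = some g then some k else lastIdx gems k g

-- running lex-minimum over a list of candidate windows (proof-side model of A's sort)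
def stepMin (best : Option (Nat × Nat)) (l r : Nat) : Option (Nat × Nat) :=
  match best with
  | none => some (l, r)
  | some b => if r - l < b.2 - b.1 then some (l, r) else best
def minB (pairs : List (Nat × Nat)) : Option (Nat × Nat) :=
  pairs.foldl (fun b p => stepMin b p.1 p.2) none
-- A's final answer-extraction
def finishA (ans : List (List Int)) : List Int :=
  PySem.List.pyGetD (PySem.List.sorted2 ans
      (fun x => PySem.List.pyGetD x 1 0 - PySem.List.pyGetD x 0 0)
      (fun x => PySem.List.pyGetD x 0 0)) 0 []

theorem ddP_eq (gems : List String) : ddP gems = gems.toFinset.card := by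
  unfold ddP
  rw [← List.toFinset_card_of_nodup (PySem.Set.nodup_ofList gems)]
  congr 1
  ext x
  simp [PySem.Set.mem_ofList]

theorem winW_subset (gems : List String) (l r : Nat) : ∀ x ∈ winW gems l r, x ∈ gems := by
  intro x hx
  unfold winW at hx
  exact List.mem_of_mem_drop (List.mem_of_mem_take hx)

theorem cardW_le_len (gems : List String) (l r : Nat) : cardW gems l r ≤ r + 1 - l := by
  calc (winW gems l r).toFinset.card ≤ (winW gems l r).length := (winW gems l r).toFinset_card_le
    _ ≤ r + 1 - l := by unfold winW; exact (List.length_take_le _ _)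

theorem ddP_pos (gems : List String) (h : gems ≠ []) : 1 ≤ ddP gems := by
  rw [ddP_eq]
  rcases gems with _ | ⟨g, t⟩
  · exact absurd rfl h
  · have : g ∈ (g :: t).toFinset := by simp
    exact Finset.card_pos.mpr ⟨g, this⟩

theorem mem_winW (gems : List String) (l r : Nat) (x : String) :
    x ∈ winW gems l r ↔ ∃ i, l ≤ i ∧ i ≤ r ∧ gems[i]? = some x := by
  unfold winW
  rw [List.mem_iff_getElem?]
  constructor
  · rintro ⟨j, hj⟩
    rw [List.getElem?_take] at hj
    split at hj
    · next hjlt =>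
        rw [List.getElem?_drop] at hj
        exact ⟨l + j, by omega, by omega, hj⟩
    · exact absurd hj (by simp)
  · rintro ⟨i, hli, hir, hi⟩
    refine ⟨i - l, ?_⟩
    rw [List.getElem?_take]
    rw [if_pos (by omega)]
    rw [List.getElem?_drop]
    have : l + (i - l) = i := by omega
    rw [this]
    exact hi

theorem cardW_eq_iff (gems : List String) (l r : Nat) :
    cardW gems l r = ddP gems ↔ ∀ g ∈ gems, g ∈ winW gems l r := by
  rw [ddP_eq]
  unfold cardW
  constructor
  · intro h g hg
    have hsub : (winW gems l r).toFinset ⊆ gems.toFinset := by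
      intro x hx
      simp only [List.mem_toFinset] at *
      exact winW_subset gems l r x hx
    have heq : (winW gems l r).toFinset = gems.toFinset :=
      Finset.eq_of_subset_of_card_le hsub (by omega)
    have : g ∈ (winW gems l r).toFinset := by rw [heq]; simp [hg]
    simpa using this
  · intro h
    have heq : (winW gems l r).toFinset = gems.toFinset := by
      apply Finset.Subset.antisymm
      · intro x hx
        simp only [List.mem_toFinset] at *
        exact winW_subset gems l r x hx
      · intro x hx
        simp only [List.mem_toFinset] at *
        exact h x hx
    rw [heq]

-- widening a covering window keeps it covering
theorem covSub (gems : List String) (l r l' r' : Nat) (h : Cov gems l r)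
    (h1 : l' ≤ l) (h2 : r ≤ r') (h3 : r' < gems.length) : Cov gems l' r' := by
  obtain ⟨hlr, hrn, hmem⟩ := h
  refine ⟨by omega, h3, ?_⟩
  intro g hg
  rw [mem_winW]
  obtain ⟨i, hi1, hi2, hi3⟩ := (mem_winW gems l r g).mp (hmem g hg)
  exact ⟨i, by omega, by omega, hi3⟩

theorem lastIdx_spec (gems : List String) :
    ∀ (k : Nat) (g : String) (i : Nat), lastIdx gems k g = some i → i < k ∧ gems[i]? = some g := by
  intro k
  induction k with
  | zero => intro g i h; exact absurd h (by simp [lastIdx])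
  | succ k ih =>
      intro g i h
      unfold lastIdx at h
      split at h
      · next hk =>
          cases h
          exact ⟨by omega, hk⟩
      · obtain ⟨h1, h2⟩ := ih g i h
        exact ⟨by omega, h2⟩

theorem lastIdx_ge (gems : List String) :
    ∀ (k : Nat) (g : String) (i : Nat), gems[i]? = some g → i < k →
      ∃ j, lastIdx gems k g = some j ∧ i ≤ j := by
  intro k
  induction k with
  | zero => intro g i _ h; omega
  | succ k ih =>
      intro g i hi hik
      unfold lastIdx
      split
      · exact ⟨k, rfl, by omega⟩
      · next hk =>
          rcases Decidable.em (i = k) with rfl | hne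
          · exact absurd hi hk
          · obtain ⟨j, hj1, hj2⟩ := ih g i hi (by omega)
            exact ⟨j, hj1, hj2⟩

theorem mem_take_iff (gems : List String) (k : Nat) (x : String) :
    x ∈ gems.take k ↔ ∃ i, i < k ∧ gems[i]? = some x := by
  rw [List.mem_iff_getElem?]
  constructor
  · rintro ⟨j, hj⟩
    rw [List.getElem?_take] at hj
    split at hj
    · next h => exact ⟨j, h, hj⟩
    · exact absurd hj (by simp)
  · rintro ⟨i, h1, h2⟩
    refine ⟨i, ?_⟩
    rw [List.getElem?_take, if_pos h1]
    exact h2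

theorem winW_zero (gems : List String) (k : Nat) : winW gems 0 k = gems.take (k+1) := by
  unfold winW
  simp

-- ---- A-side window bookkeeping (count dict and cnt follow the moving window) ----

theorem winW_extend (gems : List String) (l r : Nat) (h1 : l ≤ r + 1) (h2 : r + 1 < gems.length) :
    winW gems l (r+1) = winW gems l r ++ [gems[r+1]] := by
  unfold winW
  have hlen : r + 1 - l < (gems.drop l).length := by
    rw [List.length_drop]; omega
  have h3 : r + 1 + 1 - l = (r + 1 - l) + 1 := by omega
  rw [h3, List.take_add_one, List.getElem?_eq_getElem hlen]
  have : (List.drop l gems)[r+1-l] = gems[r+1] := by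
    rw [List.getElem_drop]
    congr 1
    omega
  rw [this]
  simp

theorem winW_shrink (gems : List String) (l r : Nat) (h1 : l ≤ r) (h2 : r < gems.length) :
    winW gems l r = gems[l] :: winW gems (l+1) r := by
  unfold winW
  have hl : l < gems.length := by omega
  rw [List.drop_eq_getElem_cons hl]
  have h3 : r + 1 - l = (r + 1 - (l+1)) + 1 := by omega
  rw [h3]; rfl

theorem winW_empty (gems : List String) (r : Nat) : winW gems (r+1) r = [] := by
  unfold winW
  simp

theorem cardW_extend_new (gems : List String) (l r : Nat) (h1 : l ≤ r + 1) (h2 : r + 1 < gems.length)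
    (h : gems[r+1] ∉ winW gems l r) : cardW gems l (r+1) = cardW gems l r + 1 := by
  unfold cardW
  rw [winW_extend gems l r h1 h2]
  simp only [List.toFinset_append, List.toFinset_cons, List.toFinset_nil]
  rw [Finset.union_comm, insert_empty_eq, Finset.singleton_union]
  rw [Finset.card_insert_of_notMem (by simpa using h)]

theorem cardW_extend_old (gems : List String) (l r : Nat) (h1 : l ≤ r + 1) (h2 : r + 1 < gems.length)
    (h : gems[r+1] ∈ winW gems l r) : cardW gems l (r+1) = cardW gems l r := by
  unfold cardW
  rw [winW_extend gems l r h1 h2]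
  simp only [List.toFinset_append, List.toFinset_cons, List.toFinset_nil]
  rw [Finset.union_comm, insert_empty_eq, Finset.singleton_union]
  rw [Finset.insert_eq_self.mpr (by simpa using h)]

theorem cardW_shrink_gone (gems : List String) (l r : Nat) (h1 : l ≤ r) (h2 : r < gems.length)
    (h : gems[l] ∉ winW gems (l+1) r) : cardW gems l r = cardW gems (l+1) r + 1 := by
  unfold cardW
  rw [winW_shrink gems l r h1 h2]
  simp only [List.toFinset_cons]
  rw [Finset.card_insert_of_notMem (by simpa using h)]

theorem cardW_shrink_stay (gems : List String) (l r : Nat) (h1 : l ≤ r) (h2 : r < gems.length)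
    (h : gems[l] ∈ winW gems (l+1) r) : cardW gems l r = cardW gems (l+1) r := by
  unfold cardW
  rw [winW_shrink gems l r h1 h2]
  simp only [List.toFinset_cons]
  rw [Finset.insert_eq_self.mpr (by simpa using h)]

theorem getD_zero_foldl (xs : List String) :
    ∀ (d : PySem.Dict String Int), (∀ s, d.getD s 0 = 0) →
    ∀ s, (xs.foldl (fun d j => d.insert j 0) d).getD s 0 = 0 := by
  induction xs with
  | nil => intro d h s; exact h s
  | cons x t ih =>
      intro d h s
      simp only [List.foldl_cons]
      apply ih
      intro s'
      rw [PySem.Dict.getD_insert]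
      split <;> simp [h]

-- invariant transfer: removing gems[l] from the dict view tracks the shrunk window
theorem inv_shrink (gems : List String) (l r : Nat) (h1 : l ≤ r) (h2 : r < gems.length)
    (d : PySem.Dict String Int)
    (hd : ∀ s, d.getD s 0 = ((winW gems l r).count s : Int)) :
    ∀ s, ((d.insert gems[l] (d.getD gems[l] 0 - 1)).getD s 0)
        = ((winW gems (l+1) r).count s : Int) := by
  intro s
  rw [PySem.Dict.getD_insert]
  have hw := winW_shrink gems l r h1 h2
  split
  · next heq =>
      subst heq
      rw [hd]
      rw [hw, List.count_cons_self]
      push_cast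
      ring
  · next hne =>
      rw [hd, hw, List.count_cons_of_ne (fun hc => hne (by rw [hc]))]

theorem v_zero_iff (gems : List String) (l r : Nat) (h1 : l ≤ r) (h2 : r < gems.length)
    (d : PySem.Dict String Int)
    (hd : ∀ s, d.getD s 0 = ((winW gems l r).count s : Int)) :
    (d.getD gems[l] 0 - 1 = 0) ↔ gems[l] ∉ winW gems (l+1) r := by
  rw [hd, winW_shrink gems l r h1 h2, List.count_cons_self, ← List.count_eq_zero]
  constructor <;> intro h <;> omega

theorem cnt_shrink (gems : List String) (l r : Nat) (h1 : l ≤ r) (h2 : r < gems.length)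
    (d : PySem.Dict String Int)
    (hd : ∀ s, d.getD s 0 = ((winW gems l r).count s : Int)) :
    (if d.getD gems[l] 0 - 1 = 0 then (cardW gems l r : Int) - 1 else (cardW gems l r : Int))
      = (cardW gems (l+1) r : Int) := by
  split
  · next hv =>
      rw [cardW_shrink_gone gems l r h1 h2 ((v_zero_iff gems l r h1 h2 d hd).mp hv)]
      push_cast; ring
  · next hv =>
      rw [cardW_shrink_stay gems l r h1 h2 (by
        by_contra hc
        exact hv ((v_zero_iff gems l r h1 h2 d hd).mpr hc))]

theorem inv_extend (gems : List String) (l r : Nat) (h1 : l ≤ r + 1) (h2 : r + 1 < gems.length)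
    (d : PySem.Dict String Int)
    (hd : ∀ s, d.getD s 0 = ((winW gems l r).count s : Int)) :
    ∀ s, ((d.insert gems[r+1] (d.getD gems[r+1] 0 + 1)).getD s 0)
        = ((winW gems l (r+1)).count s : Int) := by
  intro s
  rw [PySem.Dict.getD_insert]
  have hw := winW_extend gems l r h1 h2
  split
  · next heq =>
      subst heq
      rw [hd, hw, List.count_append, List.count_singleton]
      push_cast
      simp
  · next hne =>
      rw [hd, hw, List.count_append]
      have : List.count s [gems[r+1]] = 0 := by
        simp [List.count_singleton]
        intro hc
        exact hne hc.symm
      rw [this]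
      simp

theorem c_zero_iff (gems : List String) (l r : Nat) (d : PySem.Dict String Int)
    (hd : ∀ s, d.getD s 0 = ((winW gems l r).count s : Int)) (g : String) :
    (d.getD g 0 = 0) ↔ g ∉ winW gems l r := by
  rw [hd, ← List.count_eq_zero]
  omega

theorem cnt_extend (gems : List String) (l r : Nat) (h1 : l ≤ r + 1) (h2 : r + 1 < gems.length)
    (d : PySem.Dict String Int)
    (hd : ∀ s, d.getD s 0 = ((winW gems l r).count s : Int)) :
    (if d.getD gems[r+1] 0 = 0 then (cardW gems l r : Int) + 1 else (cardW gems l r : Int))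
      = (cardW gems l (r+1) : Int) := by
  split
  · next hv =>
      rw [cardW_extend_new gems l r h1 h2 ((c_zero_iff gems l r d hd _).mp hv)]
      push_cast; ring
  · next hv =>
      rw [cardW_extend_old gems l r h1 h2 (by
        by_contra hc
        exact hv ((c_zero_iff gems l r d hd _).mpr hc))]

theorem cardW_single (gems : List String) (l : Nat) (h : l < gems.length) :
    cardW gems l l = 1 := by
  unfold cardW
  rw [winW_shrink gems l l le_rfl h, winW_empty]
  simp

-- ---- A's sorted-candidates extraction equals the lex-minimum of the candidate list ----

theorem minB_spec (pairs : List (Nat × Nat)) (hne : pairs ≠ [])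
    (hinc : pairs.Pairwise (fun p q => p.1 < q.1)) :
    ∃ m, minB pairs = some m ∧ m ∈ pairs ∧ ∀ p ∈ pairs, p ≠ m → lexLt m p := by
  induction pairs using List.reverseRecOn with
  | nil => exact absurd rfl hne
  | append_singleton pairs p ih =>
      rw [List.pairwise_append] at hinc
      obtain ⟨hp1, -, hlt⟩ := hinc
      rcases Decidable.em (pairs = []) with rfl | hpe
      · refine ⟨p, ?_, by simp, ?_⟩
        · simp [minB, stepMin]
        · intro q hq hne'
          simp at hq
          exact absurd hq hne'
      · obtain ⟨m, hm, hmem, hmin⟩ := ih hpe hp1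
        have hml : m.1 < p.1 := hlt m hmem p (by simp)
        have hstep : minB (pairs ++ [p]) = stepMin (minB pairs) p.1 p.2 := by
          unfold minB
          rw [List.foldl_append]
          rfl
        rw [hstep, hm]
        unfold stepMin
        by_cases hcmp : p.2 - p.1 < m.2 - m.1
        · refine ⟨p, by simp [hcmp], by simp, ?_⟩
          intro q hq hne'
          rcases List.mem_append.mp hq with hq | hq
          · rcases Decidable.em (q = m) with rfl | hqm
            · exact Or.inl hcmp
            · have := hmin q hq hqm
              unfold lexLt at *
              omega
          · simp at hq
            exact absurd hq hne'
        · refine ⟨m, by simp [hcmp], List.mem_append.mpr (Or.inl hmem), ?_⟩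
          intro q hq hne'
          rcases List.mem_append.mp hq with hq | hq
          · exact hmin q hq hne'
          · simp at hq
            subst hq
            unfold lexLt
            omega

theorem insertBy_congr {α : Type} (bf bg : α → α → Bool) (x : α) :
    ∀ (acc : List α), (∀ y ∈ acc, bf x y = bg x y) →
    PySem.List.insertBy bf x acc = PySem.List.insertBy bg x acc := by
  intro acc
  induction acc with
  | nil => intro _; rfl
  | cons y ys ih =>
      intro h
      simp only [PySem.List.insertBy]
      rw [h y (by simp)]
      split
      · rfl
      · rw [ih (fun z hz => h z (by simp [hz]))]

theorem foldl_insertBy_congr {α : Type} (bf bg : α → α → Bool) (full : List α)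
    (h : ∀ a ∈ full, ∀ b ∈ full, bf a b = bg a b) :
    ∀ (xs acc : List α), (∀ a ∈ xs, a ∈ full) → (∀ a ∈ acc, a ∈ full) →
    xs.foldl (fun acc x => PySem.List.insertBy bf x acc) acc =
      xs.foldl (fun acc x => PySem.List.insertBy bg x acc) acc := by
  intro xs
  induction xs with
  | nil => intro acc _ _; rfl
  | cons x t ih =>
      intro acc hxs hacc
      simp only [List.foldl_cons]
      rw [insertBy_congr bf bg x acc (fun y hy => h x (hxs x (by simp)) y (hacc y hy))]
      apply ih
      · exact fun a ha => hxs a (by simp [ha])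
      · intro a ha
        rw [PySem.List.mem_insertBy] at ha
        rcases ha with rfl | ha
        · exact hxs a (by simp)
        · exact hacc a ha

theorem pyGetD_pair (a b d : Int) : PySem.List.pyGetD [a, b] 0 d = a ∧ PySem.List.pyGetD [a, b] 1 d = b := by
  constructor <;> simp [PySem.List.pyGetD, PySem.List.pyGet?, PySem.List.pyIdx?]

-- A single integer key that orders 2-element lists exactly like the pair key of A's sort
def keyI (M : Int) (x : List Int) : Int :=
  (PySem.List.pyGetD x 1 0 - PySem.List.pyGetD x 0 0) * M + PySem.List.pyGetD x 0 0

theorem pyGetD_cons_zero {α : Type} (x : α) (t : List α) (d : α) :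
    PySem.List.pyGetD (x :: t) 0 d = x := by
  simp [PySem.List.pyGetD, PySem.List.pyGet?, PySem.List.pyIdx?]

theorem sorted2_congr_key (xs : List (List Int)) (k1 k2 : List Int → Int) (key : List Int → Int)
    (h : ∀ a ∈ xs, ∀ b ∈ xs,
      (decide (k1 a < k1 b) || (!decide (k1 b < k1 a) && decide (k2 a < k2 b))) = decide (key a < key b)) :
    PySem.List.sorted2 xs k1 k2 = PySem.List.sorted xs key := by
  unfold PySem.List.sorted2 PySem.List.sorted
  exact foldl_insertBy_congr _ _ xs h xs [] (fun a ha => ha) (by simp)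

theorem finishA_eq_minB (pairs : List (Nat × Nat)) (N : Nat) (hne : pairs ≠ [])
    (hinc : pairs.Pairwise (fun p q => p.1 < q.1))
    (hb : ∀ p ∈ pairs, p.1 ≤ p.2 ∧ p.2 < N) :
    ∃ m, minB pairs = some m ∧ finishA (pairs.map pairF) = pairF m ∧ m ∈ pairs ∧
      ∀ p ∈ pairs, p ≠ m → lexLt m p := by
  obtain ⟨m, hm, hmem, hmin⟩ := minB_spec pairs hne hinc
  refine ⟨m, hm, ?_, hmem, hmin⟩
  have hk1 : ∀ p : Nat × Nat, PySem.List.pyGetD (pairF p) 1 0 - PySem.List.pyGetD (pairF p) 0 0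
      = (p.2 : Int) - p.1 := by
    intro p
    unfold pairF
    rw [(pyGetD_pair _ _ _).1, (pyGetD_pair _ _ _).2]
    ring
  have hk2 : ∀ p : Nat × Nat, PySem.List.pyGetD (pairF p) 0 0 = (p.1 : Int) + 1 := by
    intro p
    unfold pairF
    exact (pyGetD_pair _ _ _).1
  have hkey : ∀ p : Nat × Nat, keyI ((N:Int)+2) (pairF p) = ((p.2:Int) - p.1) * ((N:Int)+2) + ((p.1:Int) + 1) := by
    intro p
    unfold keyI
    rw [hk1, hk2]
  have hlex : ∀ p ∈ pairs, ∀ q ∈ pairs,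
      (keyI ((N:Int)+2) (pairF p) < keyI ((N:Int)+2) (pairF q)) ↔
      ((p.2:Int) - p.1 < (q.2:Int) - q.1 ∨ ((p.2:Int) - p.1 = (q.2:Int) - q.1 ∧ p.1 < q.1)) := by
    intro p hp q hq
    obtain ⟨hp1, hp2⟩ := hb p hp
    obtain ⟨hq1, hq2⟩ := hb q hq
    rw [hkey, hkey]
    constructor
    · intro h
      rcases lt_trichotomy ((p.2:Int) - p.1) ((q.2:Int) - q.1) with h' | h' | h'
      · exact Or.inl h'
      · right; constructor; exact h'; rw [h'] at h; omega
      · exfalso; nlinarith [Int.ofNat_le.mpr hp1]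
    · intro h
      rcases h with h | ⟨h1, h2⟩
      · nlinarith
      · rw [h1]; omega
  have hss : PySem.List.sorted2 (pairs.map pairF)
      (fun x => PySem.List.pyGetD x 1 0 - PySem.List.pyGetD x 0 0)
      (fun x => PySem.List.pyGetD x 0 0) =
      PySem.List.sorted (pairs.map pairF) (keyI ((N:Int)+2)) := by
    apply sorted2_congr_key
    intro a ha b hb'
    obtain ⟨p, hp, rfl⟩ := List.mem_map.mp ha
    obtain ⟨q, hq, rfl⟩ := List.mem_map.mp hb'
    rw [Bool.eq_iff_iff]
    simp only [Bool.or_eq_true, Bool.and_eq_true, Bool.not_eq_true', decide_eq_true_eq,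
      decide_eq_false_iff_not]
    rw [hk1, hk1, hk2, hk2, hlex p hp q hq]
    omega
  unfold finishA
  rw [hss]
  have hnil : PySem.List.sorted (pairs.map pairF) (keyI ((N:Int)+2)) ≠ [] := by
    rw [Ne, PySem.List.sorted_eq_nil_iff]
    simp [hne]
  obtain ⟨m', t, hsort⟩ : ∃ m' t, PySem.List.sorted (pairs.map pairF) (keyI ((N:Int)+2)) = m' :: t := by
    rcases hsrt : PySem.List.sorted (pairs.map pairF) (keyI ((N:Int)+2)) with _ | ⟨a, t⟩
    · exact absurd hsrt hnil
    · exact ⟨a, t, rfl⟩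
  have hm'mem : m' ∈ pairs.map pairF := by
    rw [← PySem.List.mem_sorted (key := keyI ((N:Int)+2)) (rev := false), hsort]
    simp
  obtain ⟨q, hq, rfl⟩ := List.mem_map.mp hm'mem
  have hle := PySem.List.key_head_sorted_le (pairs.map pairF) (keyI ((N:Int)+2)) hsort
  have hqm : q = m := by
    by_contra hne'
    have h1 : lexLt m q := hmin q hq hne'
    have h2 : keyI ((N:Int)+2) (pairF q) ≤ keyI ((N:Int)+2) (pairF m) :=
      hle (pairF m) (List.mem_map.mpr ⟨m, hmem, rfl⟩)
    have h3 : keyI ((N:Int)+2) (pairF m) < keyI ((N:Int)+2) (pairF q) := by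
      rw [hlex m hmem q hq]
      obtain ⟨hm1, hm2⟩ := hb m hmem
      obtain ⟨hq1, hq2⟩ := hb q hq
      unfold lexLt at h1
      omega
    omega
  subst hqm
  rw [hsort, pyGetD_cons_zero]

-- terminal step: a candidate list that contains the global optimum sorts it to the front
theorem finA_opt (gems : List String) (pairs : List (Nat × Nat)) (m : Nat × Nat)
    (hpw : pairs.Pairwise (fun p q => p.1 < q.1))
    (hcov : ∀ p ∈ pairs, Cov gems p.1 p.2)
    (hm : m ∈ pairs) (hopt : GOpt gems m) :
    finishA (pairs.map pairF) = pairF m := by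
  have hne : pairs ≠ [] := by
    intro h
    rw [h] at hm
    simp at hm
  obtain ⟨mb, _, hfin, hmb, hmin⟩ := finishA_eq_minB pairs gems.length hne hpw
    (fun p hp => ⟨(hcov p hp).1, (hcov p hp).2.1⟩)
  have : mb = m := by
    by_contra hne'
    have h1 : lexLt mb m := hmin m hm (fun h => hne' h.symm)
    have h2 : lexLt m mb := hopt.2 mb (hcov mb hmb) hne'
    unfold lexLt at h1 h2
    omega
  rw [hfin, this]

-- the global optimum is in A's candidate list once its start is left of l
theorem opt_mem_pairs (gems : List String) (m : Nat × Nat) (pairs : List (Nat × Nat)) (l : Nat)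
    (hopt : GOpt gems m) (hm1 : m.1 < l)
    (hP2 : ∀ l', l' < l → (∃ r', Cov gems l' r') → ∃ rr, (l', rr) ∈ pairs)
    (hprops : ∀ p ∈ pairs, Cov gems p.1 p.2 ∧ ∀ r' < p.2, ¬ Cov gems p.1 r') :
    m ∈ pairs := by
  obtain ⟨rr, hrr⟩ := hP2 m.1 hm1 ⟨m.2, hopt.1⟩
  obtain ⟨hcov, hmin⟩ := hprops (m.1, rr) hrr
  have hle : rr ≤ m.2 := by
    by_contra h
    exact hmin m.2 (by omega) hopt.1
  have : rr = m.2 := by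
    rcases Decidable.em (rr = m.2) with h | h
    · exact h
    · exfalso
      have hne : (m.1, rr) ≠ m := by
        intro hc
        exact h (congrArg Prod.snd hc)
      have := hopt.2 (m.1, rr) hcov hne
      unfold lexLt at this
      have hm12 := hopt.1.1
      simp at this
      omega
  subst this
  simpa using hrr

-- ---- simulation of A's loop: from an aligned state it returns the global optimum ----

theorem simA (gems : List String) (m : Nat × Nat) (hopt : GOpt gems m) :
    ∀ (fuel l r : Nat) (check : PySem.Dict String Int) (cnt : Int) (pairs : List (Nat × Nat)),
    r < gems.length → l ≤ r + 1 →
    (∀ s, check.getD s 0 = ((winW gems l r).count s : Int)) →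
    cnt = (cardW gems l r : Int) →
    pairs.Pairwise (fun p q => p.1 < q.1) →
    (∀ p ∈ pairs, Cov gems p.1 p.2 ∧ p.1 < l ∧ p.2 ≤ r ∧ ∀ r' < p.2, ¬ Cov gems p.1 r') →
    (∀ l', l' < l → (∃ r', Cov gems l' r') → ∃ rr, (l', rr) ∈ pairs) →
    (∀ r', r' < r → ¬ Cov gems l r') →
    (l = r + 1 → m ∈ pairs) →
    2*gems.length - l - r ≤ fuel →
    finishA (solA_loop gems gems.length (ddP gems) l r check cnt (pairs.map pairF) fuel) = pairF m := by
  intro fuel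
  induction fuel with
  | zero =>
      intro l r check cnt pairs hr hlr _ _ _ _ _ _ _ hfuel
      omega
  | succ f ih =>
      intro l r check cnt pairs hr hlr hchk hcnt hpw hprops hP2 hI3 hdead hfuel
      subst hcnt
      have hcnt_iff : ((cardW gems l r : Nat) : Int) = ((ddP gems : Nat) : Int) ↔
          cardW gems l r = ddP gems := by omega
      by_cases hle : l ≤ r
      · have hln : l < gems.length := by omega
        have hgl : gems.getD l "" = gems[l] := List.getD_eq_getElem gems "" hln
        by_cases hbrk : r = gems.length - 1 ∧ r - l + 1 < ddP gems
        · -- A breaks out: no covering window starts at or right of l, so m is in pairs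
          conv_lhs => rw [solA_loop]
          rw [if_pos hle, if_pos hbrk]
          have hm1 : m.1 < l := by
            by_contra hc
            push_neg at hc
            have hcov : Cov gems l r :=
              covSub gems m.1 m.2 l r hopt.1 hc (by have := hopt.1.2.1; omega) hr
            have := (cardW_eq_iff gems l r).mpr hcov.2.2
            have := cardW_le_len gems l r
            omega
          exact finA_opt gems pairs m hpw (fun p hp => (hprops p hp).1)
            (opt_mem_pairs gems m pairs l hopt hm1 hP2
              (fun p hp => ⟨(hprops p hp).1, (hprops p hp).2.2.2⟩)) hopt
        · by_cases hcd : ((cardW gems l r : Nat) : Int) = ((ddP gems : Nat) : Int)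
          · -- cnt == dia: record the window and shrink from the left
            have hcovlr : Cov gems l r :=
              ⟨hle, hr, (cardW_eq_iff gems l r).mp (hcnt_iff.mp hcd)⟩
            conv_lhs => rw [solA_loop]
            rw [if_pos hle, if_neg hbrk, if_pos hcd]
            simp only [hgl]
            rw [cnt_shrink gems l r hle hr check hchk]
            have hans : (pairs.map pairF) ++ [[(l : Int) + 1, (r : Int) + 1]]
                = ((pairs ++ [(l, r)]).map pairF) := by
              simp [pairF]
            rw [hans]
            have hP2' : ∀ l', l' < l + 1 → (∃ r', Cov gems l' r') →
                ∃ rr, (l', rr) ∈ pairs ++ [(l, r)] := by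
              intro l' hl' hex
              rcases Decidable.em (l' = l) with rfl | hne'
              · exact ⟨r, by simp⟩
              · obtain ⟨rr, hrr⟩ := hP2 l' (by omega) hex
                exact ⟨rr, by simp [hrr]⟩
            have hprops' : ∀ p ∈ pairs ++ [(l, r)],
                Cov gems p.1 p.2 ∧ p.1 < l + 1 ∧ p.2 ≤ r ∧ ∀ r' < p.2, ¬ Cov gems p.1 r' := by
              intro p hp
              rcases List.mem_append.mp hp with hp | hp
              · obtain ⟨h1, h2, h3, h4⟩ := hprops p hp
                exact ⟨h1, by omega, h3, h4⟩
              · simp only [List.mem_singleton] at hp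
                subst hp
                exact ⟨hcovlr, by omega, le_rfl, hI3⟩
            apply ih (l+1) r _ _ (pairs ++ [(l, r)]) hr (by omega)
              (inv_shrink gems l r hle hr check hchk)
              rfl
              (List.pairwise_append.mpr ⟨hpw, List.pairwise_singleton _ _,
                fun p hp q hq => by
                  simp only [List.mem_singleton] at hq
                  subst hq
                  exact (hprops p hp).2.1⟩)
              hprops' hP2'
              (by
                intro r' hr' hc
                exact hI3 r' hr' (covSub gems (l+1) r' l r' hc (by omega) le_rfl hc.2.1))
              (by
                intro heq
                have hlr' : l = r := by omega
                subst hlr'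
                -- the window is the single gem gems[l]; the optimum has length 0
                rcases Decidable.em (m = (l, l)) with rfl | hne'
                · exact List.mem_append.mpr (Or.inr (by simp))
                · have hlx := hopt.2 (l, l) hcovlr (fun h => hne' h.symm)
                  unfold lexLt at hlx
                  simp at hlx
                  have hm1 : m.1 < l := by omega
                  exact List.mem_append.mpr (Or.inl
                    (opt_mem_pairs gems m pairs l hopt hm1 hP2
                      (fun p hp => ⟨(hprops p hp).1, (hprops p hp).2.2.2⟩))))
              (by omega)
          · by_cases hrn : r ≠ gems.length - 1
            · -- cnt < dia and r can still move right: extend the window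
              have hr1 : r + 1 < gems.length := by omega
              have hgr : gems.getD (r+1) "" = gems[r+1] := List.getD_eq_getElem gems "" hr1
              conv_lhs => rw [solA_loop]
              rw [if_pos hle, if_neg hbrk, if_neg hcd, if_pos hrn]
              simp only [hgr]
              rw [cnt_extend gems l r (by omega) hr1 check hchk]
              apply ih l (r+1) _ _ pairs hr1 (by omega)
                (inv_extend gems l r (by omega) hr1 check hchk)
                rfl hpw
                (fun p hp => by
                  obtain ⟨h1, h2, h3, h4⟩ := hprops p hp
                  exact ⟨h1, h2, by omega, h4⟩)
                hP2
                (by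
                  intro r' hr' hc
                  rcases Decidable.em (r' = r) with rfl | hne'
                  · exact hcd (hcnt_iff.mpr ((cardW_eq_iff gems l r').mpr hc.2.2))
                  · exact hI3 r' (by omega) hc)
                (fun heq => absurd heq (by omega))
                (by omega)
            · -- cnt < dia at the right end: shrink without recording
              conv_lhs => rw [solA_loop]
              rw [if_pos hle, if_neg hbrk, if_neg hcd, if_neg hrn]
              simp only [hgl]
              rw [cnt_shrink gems l r hle hr check hchk]
              have hrl : r = gems.length - 1 := by omega
              have hnoc : ∀ r', ¬ Cov gems l r' := by
                intro r' hc
                have hr'le : r' ≤ r := by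
                  have := hc.2.1
                  omega
                rcases Decidable.em (r' = r) with rfl | hne'
                · exact hcd (hcnt_iff.mpr ((cardW_eq_iff gems l r').mpr hc.2.2))
                · exact hI3 r' (by omega) hc
              apply ih (l+1) r _ _ pairs hr (by omega)
                (inv_shrink gems l r hle hr check hchk)
                rfl hpw
                (fun p hp => by
                  obtain ⟨h1, h2, h3, h4⟩ := hprops p hp
                  exact ⟨h1, by omega, h3, h4⟩)
                (by
                  intro l' hl' hex
                  rcases Decidable.em (l' = l) with rfl | hne'
                  · obtain ⟨r', hr'⟩ := hex
                    exact absurd hr' (hnoc r')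
                  · exact hP2 l' (by omega) hex)
                (by
                  intro r' hr' hc
                  exact hnoc r' (covSub gems (l+1) r' l r' hc (by omega) le_rfl hc.2.1))
                (by
                  intro heq
                  have hlr' : l = r := by omega
                  subst hlr'
                  have hm1 : m.1 < l := by
                    by_contra hcon
                    push_neg at hcon
                    have hcov := hopt.1
                    have hm2 : m.2 ≤ l := by
                      have := hcov.2.1
                      omega
                    have hm12 : m.1 ≤ m.2 := hcov.1
                    have hmeq : m = (l, l) := by
                      have : m.1 = l ∧ m.2 = l := by omega
                      exact Prod.ext this.1 this.2
                    rw [hmeq] at hcov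
                    exact hnoc l hcov
                  exact opt_mem_pairs gems m pairs l hopt hm1 hP2
                    (fun p hp => ⟨(hprops p hp).1, (hprops p hp).2.2.2⟩))
                (by omega)
      · -- l = r+1: A's while-condition fails and the answer list is sorted and read
        have hl : l = r + 1 := by omega
        conv_lhs => rw [solA_loop]
        rw [if_neg hle]
        exact finA_opt gems pairs m hpw (fun p hp => (hprops p hp).1) (hdead hl) hopt

-- ---- simulation of B's loop: it produces the global optimum ----

theorem simB (gems : List String) (hne : gems ≠ []) :
    ∀ (rest : List String) (k : Nat) (last : PySem.Dict String Int) (best : Option (Int × Int)),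
    gems.drop k = rest →
    (∀ g, last.get? g = (lastIdx gems k g).map (fun i => (i:Int))) →
    last.keys.Nodup →
    (∀ g, g ∈ last.keys ↔ g ∈ gems.take k) →
    (best = none → ∀ l r : Nat, Cov gems l r → ¬ (r < k)) →
    (∀ b, best = some b → ∃ bn : Nat × Nat, b = ((bn.1:Int), (bn.2:Int)) ∧ Cov gems bn.1 bn.2 ∧ bn.2 < k ∧
        ∀ l r : Nat, Cov gems l r → r < k → (l, r) ≠ bn → lexLt bn (l, r)) →
    ∃ mn : Nat × Nat, GOpt gems mn ∧
      solB_loop (PySem.Set.ofList gems).length (PySem.List.enumerate rest (k:Int)) last best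
        = some ((mn.1:Int), (mn.2:Int)) := by
  intro rest
  induction rest with
  | nil =>
      intro k last best hdrop _ _ _ hnone hsome
      have hk : gems.length ≤ k := by
        have := congrArg List.length hdrop
        simp [List.length_drop] at this
        omega
      have hcovfull : Cov gems 0 (gems.length - 1) := by
        refine ⟨by have := List.length_pos_iff.mpr hne; omega,
          by have := List.length_pos_iff.mpr hne; omega, ?_⟩
        intro g hg
        rw [winW_zero]
        have : gems.length - 1 + 1 = gems.length := by
          have := List.length_pos_iff.mpr hne; omega
        rw [this, List.take_length]
        exact hg
      rcases best with _ | b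
      · exfalso
        exact hnone rfl 0 (gems.length - 1) hcovfull
          (by have := List.length_pos_iff.mpr hne; omega)
      · obtain ⟨bn, hb, hcov, _, hmin⟩ := hsome b rfl
        refine ⟨bn, ⟨hcov, ?_⟩, ?_⟩
        · intro p hp hpne
          have := hmin p.1 p.2 hp (by have := hp.2.1; omega) (by simpa using hpne)
          simpa using this
        · simp only [PySem.List.enumerate]
          rw [solB_loop, hb]
  | cons g t ih =>
      intro k last best hdrop hH1 hH2 hH3 hnone hsome
      have hkg : gems[k]? = some g := by
        have := congrArg (·[0]?) hdrop
        simpa [List.getElem?_drop] using this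
      have hkn : k < gems.length := by
        rcases List.getElem?_eq_some_iff.mp hkg with ⟨h, _⟩
        exact h
      have hdropk : gems.drop (k+1) = t := by
        have : gems.drop (k+1) = (gems.drop k).drop 1 := by
          rw [List.drop_drop]
        rw [this, hdrop]
        rfl
      have htake : gems.take (k+1) = gems.take k ++ [g] := by
        rw [List.take_succ, hkg]
        rfl
      rw [PySem.List.enumerate_cons, solB_loop]
      have hcast : (k:Int) + 1 = ((k+1 : Nat) : Int) := by push_cast; ring
      rw [hcast]
      -- invariants for the updated dict
      have hH1' : ∀ g', (last.insert g (k:Int)).get? g'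
          = (lastIdx gems (k+1) g').map (fun i => (i:Int)) := by
        intro g'
        rw [PySem.Dict.get?_insert]
        unfold lastIdx
        rw [hkg]
        rcases Decidable.em (g' = g) with rfl | hne'
        · rw [if_pos rfl, if_pos rfl]
          rfl
        · rw [if_neg hne', if_neg (by simp; intro hc; exact hne' hc.symm)]
          exact hH1 g'
      have hH2' : (last.insert g (k:Int)).keys.Nodup := PySem.Dict.nodup_keys_insert _ _ _ hH2
      have hH3' : ∀ g', g' ∈ (last.insert g (k:Int)).keys ↔ g' ∈ gems.take (k+1) := by
        intro g'
        rw [PySem.Dict.mem_keys_insert, htake]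
        simp only [List.mem_append, List.mem_singleton]
        rw [hH3 g']
        tauto
      -- size condition ↔ the prefix already contains every type
      have hkeyset : (last.insert g (k:Int)).keys.toFinset = (gems.take (k+1)).toFinset := by
        ext x
        simp only [List.mem_toFinset]
        exact hH3' x
      have hsizeiff : ((last.insert g (k:Int)).size = (PySem.Set.ofList gems).length)
          ↔ ∀ g' ∈ gems, g' ∈ gems.take (k+1) := by
        have hsz : (last.insert g (k:Int)).size = (last.insert g (k:Int)).keys.length := by
          simp [PySem.Dict.size, PySem.Dict.keys]
        have hlen : (last.insert g (k:Int)).keys.length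
            = (gems.take (k+1)).toFinset.card := by
          rw [← List.toFinset_card_of_nodup hH2', hkeyset]
        have hkinds : (PySem.Set.ofList gems).length = gems.toFinset.card := ddP_eq gems
        have hsub : (gems.take (k+1)).toFinset ⊆ gems.toFinset := by
          intro x hx
          simp only [List.mem_toFinset] at *
          exact List.mem_of_mem_take hx
        rw [hsz, hlen, hkinds]
        constructor
        · intro h g' hg'
          have : (gems.take (k+1)).toFinset = gems.toFinset :=
            Finset.eq_of_subset_of_card_le hsub (by omega)
          have : g' ∈ (gems.take (k+1)).toFinset := by rw [this]; simp [hg']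
          simpa using this
        · intro h
          have : gems.toFinset ⊆ (gems.take (k+1)).toFinset := by
            intro x hx
            simp only [List.mem_toFinset] at *
            exact h x hx
          have := Finset.Subset.antisymm hsub this
          rw [this]
      by_cases hfull : (last.insert g (k:Int)).size = (PySem.Set.ofList gems).length
      · rw [if_pos hfull]
        -- the dict is nonempty, so min exists; it is the last occurrence of some type g0
        have hvalne : (last.insert g (k:Int)).values ≠ [] := by
          intro hv
          have : (last.insert g (k:Int)).size = 0 := by
            simp [PySem.Dict.size]
            have := congrArg List.length hv
            simpa [PySem.Dict.values] using this
          rw [hfull] at this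
          have := ddP_pos gems hne
          unfold ddP at this
          omega
        obtain ⟨v, hv⟩ : ∃ v, PySem.List.min? (last.insert g (k:Int)).values (fun x => x) = some v := by
          rcases hmv : PySem.List.min? (last.insert g (k:Int)).values (fun x => x) with _ | v
          · exact absurd ((PySem.List.min?_eq_none_iff _ _).mp hmv) hvalne
          · exact ⟨v, rfl⟩
        rw [hv]
        simp only [Option.getD_some]
        have hvmem : v ∈ (last.insert g (k:Int)).values := PySem.List.min?_mem hv
        have hvmin : ∀ y ∈ (last.insert g (k:Int)).values, v ≤ y := by
          intro y hy
          exact PySem.List.min?_isMin hv y hy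
        -- v is the last occurrence of some type g0
        obtain ⟨⟨g0, v0⟩, hg0mem, hv0⟩ := List.mem_map.mp hvmem
        have hg0get : (last.insert g (k:Int)).get? g0 = some v := by
          rw [PySem.Dict.get?_of_mem_items _ hg0mem hH2']
          exact congrArg some hv0
        obtain ⟨i0, hi0, hi0v⟩ : ∃ i0, lastIdx gems (k+1) g0 = some i0 ∧ (i0:Int) = v := by
          have := (hH1' g0).symm.trans hg0get
          rcases hli : lastIdx gems (k+1) g0 with _ | j
          · rw [hli] at this
            exact absurd this (by simp)
          · rw [hli] at this
            simp at this
            exact ⟨j, rfl, this⟩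
        obtain ⟨hi0k, hi0g⟩ := lastIdx_spec gems (k+1) g0 i0 hi0
        -- every type has a last occurrence at or after i0, at or before k
        have hF1 : ∀ g' ∈ gems, ∃ j, i0 ≤ j ∧ j ≤ k ∧ gems[j]? = some g' := by
          intro g' hg'
          have htk : g' ∈ gems.take (k+1) := hsizeiff.mp hfull g' hg'
          obtain ⟨i, hik, hig⟩ := (mem_take_iff gems (k+1) g').mp htk
          obtain ⟨j, hj, hij⟩ := lastIdx_ge gems (k+1) g' i hig hik
          have hw : (last.insert g (k:Int)).get? g' = some ((j:Nat):Int) := by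
            rw [hH1' g', hj]
            rfl
          have hwval : ((j:Nat):Int) ∈ (last.insert g (k:Int)).values :=
            List.mem_map.mpr ⟨(g', ((j:Nat):Int)), PySem.Dict.mem_items_of_get?_eq_some _ hw, rfl⟩
          have hvw : v ≤ ((j:Nat):Int) := hvmin _ hwval
          obtain ⟨hjk, hjg⟩ := lastIdx_spec gems (k+1) g' j hj
          refine ⟨j, ?_, by omega, hjg⟩
          omega
        -- the candidate window [i0..k] covers all types and is the widest doing so at k
        have hcovcand : Cov gems i0 k := by
          refine ⟨by omega, hkn, ?_⟩
          intro g' hg'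
          obtain ⟨j, h1, h2, h3⟩ := hF1 g' hg'
          exact (mem_winW gems i0 k g').mpr ⟨j, h1, h2, h3⟩
        have hg0gem : g0 ∈ gems := by
          rcases List.getElem?_eq_some_iff.mp hi0g with ⟨hlt, hget⟩
          rw [← hget]
          exact List.getElem_mem hlt
        have hmax : ∀ l', Cov gems l' k → l' ≤ i0 := by
          intro l' hc
          obtain ⟨i, hi1, hi2, hi3⟩ := (mem_winW gems l' k g0).mp (hc.2.2 g0 hg0gem)
          obtain ⟨j', hj'1, hj'2⟩ := lastIdx_ge gems (k+1) g0 i hi3 (by omega)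
          rw [hi0] at hj'1
          cases hj'1
          omega
        -- any covering window seen for the first time at this step ends exactly at k
        have hi0vcast : v = ((i0:Nat):Int) := hi0v.symm
        rcases hbb : best with _ | b
        · -- best was None: the candidate becomes the running best
          rw [hbb] at hnone
          apply ih (k+1) _ _ hdropk hH1' hH2' hH3'
          · intro hc
            exact absurd hc (by simp)
          · intro b' hb'
            simp only [Option.some.injEq] at hb'
            refine ⟨(i0, k), by rw [← hb', hi0vcast], hcovcand, by omega, ?_⟩
            intro l r hc hrk hne2
            rcases Decidable.em (r < k) with hlt | hge
            · exact absurd hc (by have := hnone rfl l r; tauto)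
            · have hrk' : r = k := by omega
              have hli0 : l ≤ i0 := hmax l (hrk' ▸ hc)
              have hlne : l ≠ i0 := by
                intro hc'
                exact hne2 (by rw [hc', hrk'])
              have hiff : lexLt (i0, k) (l, r) ↔
                  (k - i0 < r - l ∨ (k - i0 = r - l ∧ i0 < l)) := Iff.rfl
              rw [hiff]
              omega
        · -- best was some b: compare the candidate against it
          obtain ⟨bn, hbcast, hcovbn, hbnk, hminbn⟩ := hsome b hbb
          have hbn12 : bn.1 ≤ bn.2 := hcovbn.1
          rw [hbcast]
          simp only
          by_cases hlt : (k:Int) - v < (bn.2:Int) - (bn.1:Int)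
          · rw [if_pos hlt]
            apply ih (k+1) _ _ hdropk hH1' hH2' hH3'
            · intro hc
              exact absurd hc (by simp)
            · intro b' hb'
              simp only [Option.some.injEq] at hb'
              refine ⟨(i0, k), by rw [← hb', hi0vcast], hcovcand, by omega, ?_⟩
              intro l r hc hrk hne2
              rcases Decidable.em (r < k) with hltk | hge
              · -- windows ending before k are no better than bn, which the candidate beats
                have hlen : bn.2 - bn.1 ≤ r - l := by
                  rcases Decidable.em ((l, r) = bn) with heq | hne3
                  · rw [← heq]
                  · have hx := hminbn l r hc hltk hne3
                    have hiff : lexLt bn (l, r) ↔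
                        (bn.2 - bn.1 < r - l ∨ (bn.2 - bn.1 = r - l ∧ bn.1 < l)) := Iff.rfl
                    rw [hiff] at hx
                    omega
                have hiff : lexLt (i0, k) (l, r) ↔
                    (k - i0 < r - l ∨ (k - i0 = r - l ∧ i0 < l)) := Iff.rfl
                rw [hiff]
                rw [hi0vcast] at hlt
                omega
              · have hrk' : r = k := by omega
                have hli0 : l ≤ i0 := hmax l (hrk' ▸ hc)
                have hlne : l ≠ i0 := by
                  intro hc'
                  exact hne2 (by rw [hc', hrk'])
                have hiff : lexLt (i0, k) (l, r) ↔
                    (k - i0 < r - l ∨ (k - i0 = r - l ∧ i0 < l)) := Iff.rfl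
                rw [hiff]
                omega
          · rw [if_neg hlt]
            apply ih (k+1) _ _ hdropk hH1' hH2' hH3'
            · intro hc
              exact absurd hc (by simp)
            · intro b' hb'
              simp only [Option.some.injEq] at hb'
              refine ⟨bn, by rw [← hb'], hcovbn, by omega, ?_⟩
              intro l r hc hrk hne2
              rcases Decidable.em (r < k) with hltk | hge
              · exact hminbn l r hc hltk hne2
              · have hrk' : r = k := by omega
                have hli0 : l ≤ i0 := hmax l (hrk' ▸ hc)
                rw [hi0vcast] at hlt
                have hiff : lexLt bn (l, r) ↔
                    (bn.2 - bn.1 < r - l ∨ (bn.2 - bn.1 = r - l ∧ bn.1 < l)) := Iff.rfl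
                rw [hiff]
                -- bn is no longer than k - i0 ≤ k - l; on equal length bn starts left of l
                omega
      · rw [if_neg hfull]
        -- the prefix still misses a type: no covering window ends at k
        have hnocov : ∀ l r : Nat, Cov gems l r → r < k + 1 → r < k := by
          intro l r hc hrk
          by_contra h
          have hcov0 : Cov gems 0 k := covSub gems l r 0 k hc (by omega) (by omega) hkn
          apply hfull
          rw [hsizeiff]
          intro g' hg'
          have h2 := hcov0.2.2 g' hg'
          rw [winW_zero] at h2
          exact h2
        apply ih (k+1) _ _ hdropk hH1' hH2' hH3'
        · intro hb l r hc hrk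
          exact hnone hb l r hc (hnocov l r hc hrk)
        · intro b hb
          obtain ⟨bn, h1, h2, h3, h4⟩ := hsome b hb
          exact ⟨bn, h1, h2, by omega, fun l r hc hrk => h4 l r hc (hnocov l r hc hrk)⟩

-- ===== VERDICT (by name: the statement is the Claim_ definition above) =====
set_option maxHeartbeats 1000000 in
theorem solution_spec : Claim_equal_solution := by
  unfold Claim_equal_solution
  intro gems hdom hpre
  unfold Spec_solution
  have hne : gems ≠ [] := hpre
  -- B's side: its loop returns the globally optimal window
  obtain ⟨mn, hopt, hB⟩ := simB gems hne gems 0 PySem.Dict.empty none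
    (by simp)
    (by intro g; simp [PySem.Dict.get?_empty, lastIdx])
    (by simp [PySem.Dict.keys_empty])
    (by intro g; simp [PySem.Dict.keys_empty])
    (by intro _ l r _ h; omega)
    (by intro b h; exact absurd h (by simp))
  have hBval : solution_alt gems = pairF mn := by
    have hrfl : solution_alt gems =
        (match solB_loop (PySem.Set.ofList gems).length
            (PySem.List.enumerate gems ((0:Nat):Int)) PySem.Dict.empty none with
         | some b => [b.1 + 1, b.2 + 1]
         | none => []) := rfl
    rw [hrfl, hB]
    rfl
  -- A's side: its loop collects candidates whose sorted head is the same optimum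
  rcases gems with _ | ⟨g0, rest⟩
  · exact absurd rfl hne
  have h0 : 0 < (g0 :: rest).length := by simp
  -- name the initial check dict to keep the simA application small
  obtain ⟨d, hd⟩ : ∃ d : PySem.Dict String Int, d = (((PySem.Set.ofList (g0 :: rest)).foldl (fun d j => d.insert j 0)
        PySem.Dict.empty).insert g0
        (((PySem.Set.ofList (g0 :: rest)).foldl (fun d j => d.insert j 0)
        PySem.Dict.empty).getD g0 0 + 1)) := ⟨_, rfl⟩
  have hchk1 : ∀ s, d.getD s 0 = ((winW (g0 :: rest) 0 0).count s : Int) := by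
    subst hd
    have hemp : ∀ s : String, (PySem.Dict.empty : PySem.Dict String Int).getD s 0 = 0 := by
      intro s
      simp [pysem]
    have hzero0 : ∀ s, ((PySem.Set.ofList (g0 :: rest)).foldl
        (fun d j => d.insert j (0 : Int)) PySem.Dict.empty).getD s 0 = (0 : Int) :=
      getD_zero_foldl _ _ hemp
    have hw : winW (g0 :: rest) 0 0 = [g0] := rfl
    intro s
    rw [PySem.Dict.getD_insert, hw]
    split
    · next heq =>
        subst heq
        rw [hzero0, List.count_singleton]
        simp
    · next hne' =>
        rw [hzero0]
        have : List.count s [g0] = 0 := by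
          simp [List.count_singleton]
          intro hc
          exact hne' hc.symm
        rw [this]
        rfl
  have hcard1 : (1 : Int) = ((cardW (g0 :: rest) 0 0 : Nat) : Int) := by
    rw [cardW_single _ _ h0]
    rfl
  have hA : solution (g0 :: rest) = finishA (solA_loop (g0 :: rest) (g0 :: rest).length
      (ddP (g0 :: rest)) 0 0 d 1 [] (2*(g0 :: rest).length + 2)) := by
    rw [hd]
    rfl
  have hsim := simA (g0 :: rest) mn hopt (2*(g0 :: rest).length + 2) 0 0 d
    1 [] h0 (by omega) hchk1 hcard1 List.Pairwise.nil
    (by intro p hp; simp at hp)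
    (by intro l' hl' _; omega)
    (by intro r' hr' _; omega)
    (by intro h; omega)
    (by omega)
  rw [hBval, hA]
  simpa using hsim
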